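-- pv_equiv track=rewrite | github.com/jorzel/codefights | challange/zigzagWords.py | zigzagWords
-- ===== SOURCE A (Python) =====
-- def zigzagWords(t, l):
--     if l == 1:
--         return t
--     t = t.replace(' ', '')
--
--     output = ""
--     up_indexes = range(l-1, len(t), 2*l - 2)
--     down_indexes = range(0, len(t), 2*l - 2)
--     up_len = len(up_indexes)
--     down_len = len(down_indexes)
--     length = up_len if up_len > down_len else down_len
--
--     for j in range(l):
--         first_pass = True
--         for i in range(length):
--             try:
--                 current_up = up_indexes[i] + j
--             except IndexError:
--                 current_up = None
--             try:
--                 current_down = down_indexes[i] + l - j - 1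
--             except IndexError:
--                 current_down = None
--
--             if current_down  == current_up:
--                 output += t[current_up]
--             else:
--                 if j == l - 1 and not first_pass:
--                     pass
--                 else:
--                     try:
--                         output += t[current_down]
--                     except (IndexError, TypeError):
--                         pass
--                 try:
--                     output += t[current_up]
--                 except (IndexError, TypeError):
--                     pass
--             first_pass = False
--     return output
-- ===== SOURCE B (Python) =====
-- def zigzagWords(t, l):
--     if l == 1:
--         return t
--     s = t.replace(' ', '')
--     p = 2 * l - 2
--     rows = {}
--     for i, ch in enumerate(s):
--         k = i % p
--         r = k if k < l else p - k
--         rows.setdefault(r, []).append(ch)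
--     return ''.join(''.join(rows.get(r, [])) for r in range(l - 1, -1, -1))
-- ===== Notes on version B (the rewrite author's own statement) =====
-- stated objective: faster
-- what changed: Replaces A's dual arithmetic range objects, option-valued indexing, try/except guards and first-pass flag with a single pass that buckets each character by a closed-form row formula (i % (2l-2), bounced at l) into a dict, joined bottom-to-top.
import Mathlib
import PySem

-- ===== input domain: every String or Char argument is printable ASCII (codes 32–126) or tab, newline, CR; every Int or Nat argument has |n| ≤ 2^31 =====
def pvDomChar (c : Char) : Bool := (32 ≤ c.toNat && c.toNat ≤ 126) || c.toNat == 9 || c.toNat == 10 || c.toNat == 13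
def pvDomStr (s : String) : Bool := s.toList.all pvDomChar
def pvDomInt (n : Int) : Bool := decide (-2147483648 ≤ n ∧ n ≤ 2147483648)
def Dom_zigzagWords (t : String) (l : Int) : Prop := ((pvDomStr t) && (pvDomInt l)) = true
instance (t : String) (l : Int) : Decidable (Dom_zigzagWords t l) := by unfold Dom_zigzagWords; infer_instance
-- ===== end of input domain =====

-- B replaces A's dual range objects, option-valued indexing, try/except guards and first-pass
-- flag with one pass over the characters that buckets each one by a closed-form row formula,
-- then joins the buckets bottom-to-top.

-- ===== PORT A =====
-- A-side helper: `try: output += t[x] except (IndexError, TypeError): pass` — a `none` index is the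
-- TypeError of t[None], an out-of-range index the IndexError; both are caught and append nothing.
def zzAppendAt (cs : List Char) (oi : Option Int) : List Char :=
  match oi with
  | some idx =>
    match PySem.List.pyGet? cs idx with
    | some c => [c]
    | none => []
  | none => []

-- A-side helper: the body of A's inner `for i in range(length)` loop; state = (output, first_pass).
-- In the `current_down == current_up` branch Python's `output += t[current_up]` is unguarded, but
-- there the two options are provably equal `some` values holding an in-range index (j = 0), so the
-- error-swallowing zzAppendAt coincides with Python on every reachable state.
def zzStep (cs : List Char) (l j : Int) (up down : List Int)
    (st : List Char × Bool) (i : Int) : List Char × Bool :=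
  let cu : Option Int := (PySem.List.pyGet? up i).map (fun v => v + j)
  let cd : Option Int := (PySem.List.pyGet? down i).map (fun v => v + l - j - 1)
  let out :=
    if cd = cu then
      st.1 ++ zzAppendAt cs cu
    else
      let out1 := if j = l - 1 ∧ st.2 = false then st.1 else st.1 ++ zzAppendAt cs cd
      out1 ++ zzAppendAt cs cu
  (out, false)

def zigzagWords (t : String) (l : Int) : String :=
  if l = 1 then t
  else
    let cs := (PySem.Str.replace t " " "").toList
    let n : Int := (cs.length : Int)
    let up := PySem.List.pyRange (l - 1) n (2 * l - 2)
    let down := PySem.List.pyRange 0 n (2 * l - 2)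
    let upLen : Int := (up.length : Int)
    let downLen : Int := (down.length : Int)
    let length : Int := if upLen > downLen then upLen else downLen
    String.ofList ((PySem.List.pyRange 0 l 1).foldl (fun out j =>
      ((PySem.List.pyRange 0 length 1).foldl (zzStep cs l j up down) (out, true)).1) [])

-- ===== PORT B =====
-- B-side helper: the rail of character i in the bounce pattern with period p = 2*l-2
-- (the two lines `k = i % p; r = k if k < l else p - k` of Source B's loop body).
def zzRow (l p i : Int) : Int :=
  let k := PySem.Int.mod i p
  if k < l then k else p - k

def zigzagWords_alt (t : String) (l : Int) : String :=
  if l = 1 then t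
  else
    let s := (PySem.Str.replace t " " "").toList
    let p : Int := 2 * l - 2
    let rows := (PySem.List.enumerate s).foldl
      (fun d q => d.modify (zzRow l p q.1) [] (· ++ [q.2])) PySem.Dict.empty
    String.ofList ((PySem.List.pyRange (l - 1) (-1) (-1)).flatMap (fun r => rows.getD r []))

-- ===== PRECONDITION & SPEC =====
def Spec_zigzagWords (t : String) (l : Int) (out : String) : Prop := out = zigzagWords_alt t l
instance (t : String) (l : Int) (out : String) : Decidable (Spec_zigzagWords t l out) := by unfold Spec_zigzagWords; infer_instance

-- ===== CLAIM (what is proved, stated in full; the proofs are below) =====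
def Claim_equal_zigzagWords : Prop := ∀ (t : String) (l : Int), Dom_zigzagWords t l → Spec_zigzagWords t l (zigzagWords t l)

-- ===== LEMMAS AND PROOFS =====

-- character fetched at position m (all positions reached below are nonnegative and < cs.length)
def zzGetC (cs : List Char) (m : Int) : Char := PySem.List.pyGetD cs m ' '

-- the positions contributed by A's inner-loop iteration i of pass j (b = first_pass)
def zzPos (l p n j i : Int) (b : Bool) : List Int :=
  if j = 0 then (if l - 1 + p * i + j < n then [l - 1 + p * i + j] else [])
  else
    (if (¬(j = l - 1 ∧ b = false)) ∧ 0 + p * i + l - j - 1 < n then [0 + p * i + l - j - 1] else [])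
      ++ (if l - 1 + p * i + j < n then [l - 1 + p * i + j] else [])

-- all positions of pass j, in A's emission order
def zzAllPos (l p n L j : Int) : List Int :=
  (PySem.List.pyRange 0 L 1).flatMap (fun i => zzPos l p n j i (i == 0))

-- pyGet? on a positive-step range
theorem zz_pyGet?_pyRange {a b s : Int} (hs : 0 < s) (i : Int) (hi : 0 ≤ i) :
    PySem.List.pyGet? (PySem.List.pyRange a b s) i =
      if a + s * i < b then some (a + s * i) else none := by
  obtain ⟨k, rfl⟩ : ∃ k : Nat, i = (k : Int) := ⟨i.toNat, by omega⟩
  rw [PySem.List.pyRange_of_pos a b hs, PySem.List.pyGet?_natCast]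
  rw [List.getElem?_map]
  by_cases hab : a < b
  · rw [if_pos hab]
    have hckey : (k < ((b - a + s - 1) / s).toNat) ↔ (a + s * k < b) := by
      rw [Int.lt_toNat, Int.lt_iff_add_one_le, Int.le_ediv_iff_mul_le hs]
      have : ((k : Int) + 1) * s = s * k + s := by ring
      omega
    by_cases h : a + s * (k : Int) < b
    · rw [if_pos h, List.getElem?_range (hckey.mpr h)]
      rfl
    · rw [if_neg h, List.getElem?_eq_none (by simp [List.length_range]; omega)]
      rfl
  · rw [if_neg hab]
    rw [List.getElem?_eq_none (by simp)]
    have h1 : ¬ (a + s * (k : Int) < b) := by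
      have : 0 ≤ s * (k : Int) := mul_nonneg hs.le (by positivity)
      omega
    rw [if_neg h1]
    rfl

-- index bound for a positive-step range
theorem zz_lt_len {a b s : Int} (hs : 0 < s) (i : Int) (hi : 0 ≤ i) :
    (i < ((PySem.List.pyRange a b s).length : Int)) ↔ a + s * i < b := by
  have hg := zz_pyGet?_pyRange (a := a) (b := b) hs i hi
  constructor
  · intro h
    by_contra hc
    rw [if_neg hc] at hg
    rw [PySem.List.pyGet?_eq_none_iff, PySem.Raise.InRange] at hg
    omega
  · intro h
    rw [if_pos h] at hg
    have h2 : PySem.List.pyGet? (PySem.List.pyRange a b s) i ≠ none := by simp [hg]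
    rw [Ne, PySem.List.pyGet?_eq_none_iff, PySem.Raise.InRange] at h2
    omega

-- the guarded append on a present (nonnegative) index
theorem zz_appendAt_some (cs : List Char) (m : Int) (hm : 0 ≤ m) :
    zzAppendAt cs (some m) = if m < (cs.length : Int) then [zzGetC cs m] else [] := by
  have hred : zzAppendAt cs (some m)
      = (match PySem.List.pyGet? cs m with | some c => [c] | none => []) := rfl
  rw [hred]
  by_cases h : m < (cs.length : Int)
  · rw [PySem.List.pyGet?_eq_some_getElem cs hm h, if_pos h]
    rw [zzGetC, PySem.List.pyGetD_eq_getElem cs ' ' hm h]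
  · rw [(PySem.List.pyGet?_eq_none_iff cs m).mpr (by rw [PySem.Raise.InRange]; omega), if_neg h]

-- one step of A's inner loop, as a pure chunk of emitted characters
theorem zz_step_eq (cs : List Char) (l j : Int) (hl : 2 ≤ l) (hj0 : 0 ≤ j) (hjl : j < l)
    (i : Int) (hi : 0 ≤ i) (hpi : (2*l-2) * i < (cs.length : Int)) (st : List Char × Bool) :
    zzStep cs l j (PySem.List.pyRange (l - 1) (cs.length : Int) (2 * l - 2))
        (PySem.List.pyRange 0 (cs.length : Int) (2 * l - 2)) st i
      = (st.1 ++ (zzPos l (2*l-2) (cs.length : Int) j i st.2).map (zzGetC cs), false) := by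
  have hp : (0:Int) < 2 * l - 2 := by omega
  have hmul : (0:Int) ≤ (2*l-2) * i := mul_nonneg (by omega) hi
  set n : Int := (cs.length : Int) with hn
  have hn0 : 0 ≤ n := by positivity
  unfold zzStep zzPos
  rw [zz_pyGet?_pyRange hp i hi, zz_pyGet?_pyRange hp i hi,
    if_pos (show 0 + (2*l-2) * i < n by omega)]
  by_cases hup : l - 1 + (2 * l - 2) * i < n
  · rw [if_pos hup]
    simp only [Option.map_some]
    by_cases hj : j = 0
    · subst hj
      rw [if_pos (congrArg some (by ring)), if_pos rfl]
      rw [zz_appendAt_some cs _ (by omega)]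
      split_ifs <;> simp [zzGetC]
    · have hne : ¬ (some (0 + (2*l-2)*i + l - j - 1) = some (l - 1 + (2*l-2)*i + j)) := by
        simp only [Option.some_inj]; omega
      rw [if_neg hne, if_neg hj]
      rw [zz_appendAt_some cs _ (by omega), zz_appendAt_some cs _ (by omega)]
      by_cases hfp : j = l - 1 ∧ st.2 = false
      · rw [if_pos hfp, if_neg (by tauto :
          ¬ ((¬(j = l - 1 ∧ st.2 = false)) ∧ 0 + (2*l-2)*i + l - j - 1 < n))]
        split_ifs <;> simp
      · rw [if_neg hfp]
        by_cases hd : 0 + (2*l-2)*i + l - j - 1 < n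
        · rw [if_pos hd, if_pos (show (¬(j = l - 1 ∧ st.2 = false)) ∧ 0 + (2*l-2)*i + l - j - 1 < n from ⟨hfp, hd⟩)]
          split_ifs <;> simp
        · rw [if_neg hd, if_neg (show ¬((¬(j = l - 1 ∧ st.2 = false)) ∧ 0 + (2*l-2)*i + l - j - 1 < n) from fun h => hd h.2)]
          split_ifs <;> simp
  · rw [if_neg hup]
    simp only [Option.map_some, Option.map_none]
    rw [if_neg (by simp)]
    have hu2 : ¬ (l - 1 + (2*l-2)*i + j < n) := by omega
    rw [if_neg hu2]
    have happ : zzAppendAt cs none = [] := rfl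
    by_cases hj : j = 0
    · subst hj
      rw [if_pos rfl, if_neg (by omega : ¬ ((0:Int) = l - 1 ∧ st.2 = false))]
      rw [zz_appendAt_some cs _ (by omega), if_neg (by omega), happ]
      simp
    · rw [if_neg hj]
      by_cases hfp : j = l - 1 ∧ st.2 = false
      · rw [if_pos hfp, if_neg (show ¬((¬(j = l - 1 ∧ st.2 = false)) ∧ 0 + (2*l-2)*i + l - j - 1 < n) from fun h => h.1 hfp), happ]
        simp
      · rw [if_neg hfp, zz_appendAt_some cs _ (by omega), happ]
        by_cases hd : 0 + (2*l-2)*i + l - j - 1 < n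
        · rw [if_pos hd, if_pos (show (¬(j = l - 1 ∧ st.2 = false)) ∧ 0 + (2*l-2)*i + l - j - 1 < n from ⟨hfp, hd⟩)]
          simp
        · rw [if_neg hd, if_neg (show ¬((¬(j = l - 1 ∧ st.2 = false)) ∧ 0 + (2*l-2)*i + l - j - 1 < n) from fun h => hd h.2)]
          simp

-- the zigzag row of a position written as q*p + r
theorem zz_row_add_mul {l p : Int} (hp0 : 0 < p) {i r : Int}
    (hr : 0 ≤ r) (hrp : r < p) :
    zzRow l p (p * i + r) = if r < l then r else p - r := by
  unfold zzRow
  rw [PySem.Int.mod_eq_emod_of_pos hp0]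
  have h1 : (p * i + r) % p = r := by
    rw [add_comm, Int.add_mul_emod_self_left, Int.emod_eq_of_lt hr hrp]
  rw [h1]

-- membership in one chunk
theorem zz_mem_zzPos {l p n j i m : Int} {b : Bool} :
    m ∈ zzPos l p n j i b ↔
      ((j = 0 ∧ m = l - 1 + p*i + j ∧ m < n) ∨
       (j ≠ 0 ∧ ¬(j = l - 1 ∧ b = false) ∧ m = 0 + p*i + l - j - 1 ∧ m < n) ∨
       (j ≠ 0 ∧ m = l - 1 + p*i + j ∧ m < n)) := by
  unfold zzPos
  by_cases h1 : j = l - 1 ∧ b = false <;> split_ifs <;> simp_all <;> omega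

-- chunks are strictly increasing
theorem zz_pos_pairwise {l p n j i : Int} {b : Bool} (hl : 2 ≤ l) (hj0 : 0 ≤ j) :
    (zzPos l p n j i b).Pairwise (· < ·) := by
  unfold zzPos
  split_ifs <;> simp <;> omega

-- a flatMap of increasing chunks over an increasing index list is increasing
theorem zz_pairwise_flatMap {f : Int → List Int} {is : List Int}
    (hs : is.Pairwise (· < ·)) (hin : ∀ i ∈ is, (f i).Pairwise (· < ·))
    (hcross : ∀ i i', i ∈ is → i' ∈ is → i < i' → ∀ m ∈ f i, ∀ m' ∈ f i', m < m') :
    (is.flatMap f).Pairwise (· < ·) := by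
  induction is with
  | nil => simp
  | cons a t ih =>
    rw [List.flatMap_cons, List.pairwise_append]
    refine ⟨hin a (by simp), ?_, ?_⟩
    · exact ih (hs.sublist (List.sublist_cons_self a t))
        (fun i hi => hin i (List.mem_cons_of_mem a hi))
        (fun i i' hi hi' => hcross i i' (List.mem_cons_of_mem a hi) (List.mem_cons_of_mem a hi'))
    · intro m hm m' hm'
      rw [List.mem_flatMap] at hm'
      obtain ⟨i', hi', hmi'⟩ := hm'
      have hai' : a < i' := (List.pairwise_cons.mp hs).1 i' hi'
      exact hcross a i' (by simp) (List.mem_cons_of_mem a hi') hai' m hm m' hmi'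

-- the positions of pass j are exactly the rail-(l-1-j) positions, in order
theorem zz_allPos_eq (l p n L j : Int) (hl : 2 ≤ l) (hp : p = 2*l-2)
    (hj0 : 0 ≤ j) (hjl : j < l) (hn : 0 ≤ n)
    (hL : ∀ i, 0 ≤ i → ((i < L) ↔ p * i < n)) :
    zzAllPos l p n L j
      = (PySem.List.pyRange 0 n 1).filter (fun i => zzRow l p i == (l - 1 - j)) := by
  have hp0 : (0:Int) < p := by omega
  have hmul : ∀ x y : Int, 0 ≤ x → x < y → p * x + p ≤ p * y := by
    intro x y hx hxy
    have h1 := mul_le_mul_of_nonneg_left (show x + 1 ≤ y by omega) (show (0:Int) ≤ p by omega)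
    nlinarith
  have hmn : ∀ x : Int, 0 ≤ x → 0 ≤ p * x := fun x hx => mul_nonneg hp0.le hx
  -- pairwise of the left side
  have pw1 : (zzAllPos l p n L j).Pairwise (· < ·) := by
    apply zz_pairwise_flatMap (PySem.List.pairwise_lt_pyRange_one 0 L)
    · intro i _; exact zz_pos_pairwise hl hj0
    · intro i i' hi hi' hii' m hm m' hm'
      have hi0 : 0 ≤ i := (PySem.List.mem_pyRange_one.mp hi).1
      have hi'0 : 0 ≤ i' := (PySem.List.mem_pyRange_one.mp hi').1
      have hii : p * i + p ≤ p * i' := hmul i i' hi0 hii'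
      have hne : (i' == 0) = false := by simp; omega
      rw [zz_mem_zzPos] at hm hm'
      rw [hne] at hm'
      rcases hm with ⟨_, hm, _⟩ | ⟨_, _, hm, _⟩ | ⟨_, hm, _⟩ <;>
        rcases hm' with ⟨_, hm', _⟩ | ⟨hj', hb', hm', _⟩ | ⟨_, hm', _⟩ <;>
          first
            | omega
            | (have hjlt : j ≠ l - 1 := fun hc => hb' ⟨hc, rfl⟩; omega)
  have pw2 : ((PySem.List.pyRange 0 n 1).filter
      (fun i => zzRow l p i == (l - 1 - j))).Pairwise (· < ·) :=
    (PySem.List.pairwise_lt_pyRange_one 0 n).filter _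
  have nd1 : (zzAllPos l p n L j).Nodup := pw1.imp (fun h => ne_of_lt h)
  have nd2 : ((PySem.List.pyRange 0 n 1).filter
      (fun i => zzRow l p i == (l - 1 - j))).Nodup := pw2.imp (fun h => ne_of_lt h)
  -- same membership
  have hmem : ∀ m, m ∈ zzAllPos l p n L j ↔
      m ∈ (PySem.List.pyRange 0 n 1).filter (fun i => zzRow l p i == (l - 1 - j)) := by
    intro m
    rw [List.mem_filter, PySem.List.mem_pyRange_one, beq_iff_eq]
    unfold zzAllPos
    rw [List.mem_flatMap]
    constructor
    · rintro ⟨i, hi, hm⟩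
      obtain ⟨hi0, hiL⟩ := PySem.List.mem_pyRange_one.mp hi
      have hpi : p * i < n := (hL i hi0).mp hiL
      have hpi0 := hmn i hi0
      rw [zz_mem_zzPos] at hm
      rcases hm with ⟨hj, hm, hmn'⟩ | ⟨hj, _, hm, hmn'⟩ | ⟨hj, hm, hmn'⟩
      · -- j = 0, m = p*i + (l-1)
        refine ⟨⟨by omega, hmn'⟩, ?_⟩
        have := zz_row_add_mul (l := l) (p := p) (by omega) (i := i) (r := l - 1 + j)
          (by omega) (by omega)
        rw [show m = p * i + (l - 1 + j) by omega, this, if_pos (by omega)]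
        omega
      · -- d-form, m = p*i + (l-1-j)
        refine ⟨⟨by omega, hmn'⟩, ?_⟩
        have := zz_row_add_mul (l := l) (p := p) (by omega) (i := i) (r := l - 1 - j)
          (by omega) (by omega)
        rw [show m = p * i + (l - 1 - j) by omega, this, if_pos (by omega)]
      · -- u-form, m = p*i + (l-1+j)
        refine ⟨⟨by omega, hmn'⟩, ?_⟩
        by_cases hje : j = l - 1
        · have := zz_row_add_mul (l := l) (p := p) (by omega) (i := i + 1) (r := 0)
            (by omega) (by omega)
          rw [show m = p * (i+1) + 0 by rw [mul_add]; omega, this, if_pos (by omega)]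
          omega
        · have := zz_row_add_mul (l := l) (p := p) (by omega) (i := i) (r := l - 1 + j)
            (by omega) (by omega)
          rw [show m = p * i + (l - 1 + j) by omega, this]
          split_ifs <;> omega
    · rintro ⟨⟨hm0, hmn'⟩, hrow⟩
      have hq0 : 0 ≤ m / p := Int.ediv_nonneg hm0 hp0.le
      have hqk : p * (m / p) + m % p = m := Int.ediv_add_emod m p
      have hk0 : 0 ≤ m % p := Int.emod_nonneg m (by omega)
      have hkp : m % p < p := Int.emod_lt_of_pos m hp0
      have hpq0 := hmn _ hq0
      have hrowv := zz_row_add_mul (l := l) (p := p) (by omega) (i := m / p) (r := m % p) hk0 hkp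
      rw [hqk] at hrowv
      rw [hrowv] at hrow
      by_cases hkl : m % p < l
      · rw [if_pos hkl] at hrow
        -- m % p = l - 1 - j
        by_cases hje : j = l - 1
        · -- m % p = 0, m = p * (m/p)
          by_cases hq : m / p = 0
          · have hmp : m % p = m := by rw [hq] at hqk; omega
            refine ⟨0, ?_, ?_⟩
            · rw [PySem.List.mem_pyRange_one]
              refine ⟨le_refl 0, (hL 0 (le_refl 0)).mpr (by omega)⟩
            · rw [zz_mem_zzPos]
              right; left
              refine ⟨by omega, ?_, by omega, hmn'⟩
              simp
          · have hpq1 : p * (m / p - 1) + p = p * (m / p) := by ring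
            refine ⟨m / p - 1, ?_, ?_⟩
            · rw [PySem.List.mem_pyRange_one]
              refine ⟨by omega, (hL _ (by omega)).mpr (by omega)⟩
            · rw [zz_mem_zzPos]
              right; right
              exact ⟨by omega, by omega, hmn'⟩
        · refine ⟨m / p, ?_, ?_⟩
          · rw [PySem.List.mem_pyRange_one]
            exact ⟨hq0, (hL _ hq0).mpr (by omega)⟩
          · rw [zz_mem_zzPos]
            by_cases hj : j = 0
            · left; exact ⟨hj, by omega, hmn'⟩
            · right; left
              exact ⟨hj, fun hc => hje hc.1, by omega, hmn'⟩
      · rw [if_neg hkl] at hrow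
        -- m % p = l - 1 + j, 1 ≤ j ≤ l - 2
        refine ⟨m / p, ?_, ?_⟩
        · rw [PySem.List.mem_pyRange_one]
          exact ⟨hq0, (hL _ hq0).mpr (by omega)⟩
        · rw [zz_mem_zzPos]
          right; right
          exact ⟨by omega, by omega, hmn'⟩
  exact List.eq_of_perm_of_sorted
    (fun a b _ _ h1 h2 => absurd h2 (not_lt_of_gt h1))
    pw1 pw2 ((List.perm_ext_iff_of_nodup nd1 nd2).mpr hmem)

-- folding the chunks of one pass, threading the first-pass flag
theorem zz_foldl_state_false (g : Int → Bool → List Char) (is : List Int) :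
    ∀ acc, (is.foldl (fun st i => (st.1 ++ g i st.2, false)) (acc, false)).1
      = acc ++ is.flatMap (fun i => g i false) := by
  induction is with
  | nil => intro acc; simp
  | cons a t ih =>
    intro acc
    simp only [List.foldl_cons, List.flatMap_cons]
    rw [ih]
    simp

theorem zz_foldl_state (g : Int → Bool → List Char) (L : Int) (acc : List Char) :
    ((PySem.List.pyRange 0 L 1).foldl (fun st i => (st.1 ++ g i st.2, false)) (acc, true)).1
      = acc ++ (PySem.List.pyRange 0 L 1).flatMap (fun i => g i (i == 0)) := by
  by_cases hL : 0 < L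
  · rw [PySem.List.pyRange_one_cons hL]
    simp only [List.foldl_cons, List.flatMap_cons]
    rw [zz_foldl_state_false]
    have hcongr : (PySem.List.pyRange (0+1) L 1).flatMap (fun i => g i (i == 0))
        = (PySem.List.pyRange (0+1) L 1).flatMap (fun i => g i false) := by
      apply List.flatMap_congr
      intro x hx
      have hx1 := (PySem.List.mem_pyRange_one.mp hx).1
      rw [show (x == 0) = false by simp; omega]
    rw [hcongr]
    simp
  · rw [PySem.List.pyRange_one_eq_nil (by omega)]
    simp

-- B's buckets: the rows dict maps r to exactly the rail-r characters, in order
theorem zz_buckets_getD (cs : List Char) (l p r : Int) :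
    ((PySem.List.enumerate cs).foldl
        (fun d q => d.modify (zzRow l p q.1) [] (· ++ [q.2])) PySem.Dict.empty).getD r []
      = ((PySem.List.pyRange 0 (cs.length : Int) 1).filter
          (fun i => zzRow l p i == r)).map (zzGetC cs) := by
  have h1 : (PySem.List.enumerate cs).foldl
        (fun d q => d.modify (zzRow l p q.1) [] (· ++ [q.2])) PySem.Dict.empty
      = (((PySem.List.enumerate cs).map (fun q => (zzRow l p q.1, q.2))).foldl
          (fun d (q : Int × Char) => d.modify q.1 [] (· ++ [q.2])) PySem.Dict.empty) := by
    rw [List.foldl_map]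
  rw [h1, PySem.Dict.getD_foldl_modify_append, PySem.List.enumerate_eq_map_pyRange cs ' ']
  rw [List.map_map, List.filter_map, List.map_map]
  simp only [Function.comp_def, PySem.List.len_eq]
  rfl

-- one pass of A's outer loop emits exactly rail l-1-j
theorem zz_pass_eq (cs : List Char) (l j : Int) (hl : 2 ≤ l) (hj0 : 0 ≤ j) (hjl : j < l)
    (out : List Char) :
    ((PySem.List.pyRange 0 ((PySem.List.pyRange 0 (cs.length : Int) (2*l-2)).length : Int) 1).foldl
        (zzStep cs l j (PySem.List.pyRange (l - 1) (cs.length : Int) (2 * l - 2))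
          (PySem.List.pyRange 0 (cs.length : Int) (2 * l - 2))) (out, true)).1
      = out ++ ((PySem.List.pyRange 0 (cs.length : Int) 1).filter
          (fun i => zzRow l (2*l-2) i == (l - 1 - j))).map (zzGetC cs) := by
  have hp0 : (0:Int) < 2*l-2 := by omega
  set L : Int := ((PySem.List.pyRange 0 (cs.length : Int) (2*l-2)).length : Int) with hLdef
  have hL : ∀ i, 0 ≤ i → ((i < L) ↔ (2*l-2) * i < (cs.length : Int)) := by
    intro i hi
    rw [hLdef]
    have := zz_lt_len (a := 0) (b := (cs.length : Int)) hp0 i hi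
    omega
  rw [PySem.List.foldl_congr_mem' _ _
      (fun (st : List Char × Bool) i =>
        (st.1 ++ (zzPos l (2*l-2) (cs.length : Int) j i st.2).map (zzGetC cs), false)) _
      (by
        intro i hi st
        obtain ⟨hi0, hiL⟩ := PySem.List.mem_pyRange_one.mp hi
        exact zz_step_eq cs l j hl hj0 hjl i hi0 ((hL i hi0).mp hiL) st)]
  rw [zz_foldl_state (fun i b => (zzPos l (2*l-2) (cs.length : Int) j i b).map (zzGetC cs)) L out]
  rw [← List.map_flatMap]
  rw [show ((PySem.List.pyRange 0 L 1).flatMap (fun i => zzPos l (2*l-2) (cs.length : Int) j i (i == 0)))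
      = zzAllPos l (2*l-2) (cs.length : Int) L j from rfl]
  rw [zz_allPos_eq l (2*l-2) (cs.length : Int) L j hl rfl hj0 hjl (by positivity) hL]

-- ===== VERDICT (by name: the statement is the Claim_ definition above) =====
set_option maxHeartbeats 1000000 in
theorem zigzagWords_spec : Claim_equal_zigzagWords := by
  intro t l _
  unfold Spec_zigzagWords zigzagWords zigzagWords_alt
  by_cases h1 : l = 1
  · rw [if_pos h1, if_pos h1]
  · rw [if_neg h1, if_neg h1]
    dsimp only
    by_cases h2 : l ≤ 0
    · rw [PySem.List.pyRange_one_eq_nil (a := 0) (b := l) (by omega),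
        PySem.List.pyRange_neg_one_eq_nil (a := l - 1) (b := -1) (by omega)]
      simp
    · have hl : 2 ≤ l := by omega
      set cs := (PySem.Str.replace t " " "").toList with hcs
      -- up_len ≤ down_len, so `length` is down_len
      have hud : ¬ (((PySem.List.pyRange (l-1) (cs.length : Int) (2*l-2)).length : Int)
          > ((PySem.List.pyRange 0 (cs.length : Int) (2*l-2)).length : Int)) := by
        intro hc
        set dL : Int := ((PySem.List.pyRange 0 (cs.length : Int) (2*l-2)).length : Int) with hdL
        have h3 : 0 ≤ dL := by positivity
        have h4 := (zz_lt_len (a := l-1) (b := (cs.length : Int)) (by omega) dL h3).mp hc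
        have h5 : ¬ ((0:Int) + (2*l-2) * dL < (cs.length : Int)) :=
          fun hx => lt_irrefl dL ((zz_lt_len (by omega) dL h3).mpr hx)
        omega
      rw [if_neg hud]
      rw [PySem.List.foldl_congr_mem' _ _
          (fun out j => out ++ ((PySem.List.pyRange 0 (cs.length : Int) 1).filter
            (fun i => zzRow l (2*l-2) i == (l - 1 - j))).map (zzGetC cs)) []
          (by
            intro j hj out
            obtain ⟨hj0, hjl⟩ := PySem.List.mem_pyRange_one.mp hj
            exact zz_pass_eq cs l j hl hj0 hjl out)]
      rw [PySem.List.foldl_append_eq_flatMap]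
      rw [List.nil_append]
      -- align the two rail orders
      rw [PySem.List.pyRange_one 0 l, PySem.List.pyRange_neg_one (l-1) (-1)]
      rw [show (l - 0).toNat = (l - 1 - -1).toNat by omega]
      rw [List.flatMap_map, List.flatMap_map]
      refine congrArg String.ofList ?_
      simp only [zz_buckets_getD]
      apply List.flatMap_congr
      intro k _
      rw [show (0 : Int) + (k:Int) = (k:Int) by omega]
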